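-- pv_equiv track=rewrite | github.com/autolab/autograders-examples | Python-solvescryptarithm/src/solvesCryptarithm.py | wordToInt
-- ===== SOURCE A (Python) =====
-- def wordToInt(word, solution):
--     result = 0
--     for c in word:
--         digit = solution.find(c)
--         if (digit < 0):
--             return None
--         result = 10*result + digit
--     return result
-- ===== SOURCE B (Python) =====
-- def wordToInt(word, solution):
--     index = {}
--     for i, c in enumerate(solution):
--         if c not in index:
--             index[c] = i
--     total = 0
--     power = 1
--     for c in reversed(word):
--         d = index.get(c)
--         if d is None:
--             return None
--         total += d * power
--         power *= 10
--     return total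
-- ===== Notes on version B (the rewrite author's own statement) =====
-- stated objective: alternative
-- what changed: B builds a first-occurrence char-to-digit hash index once (removing A's per-character solution.find scan) and then traverses the word right-to-left accumulating a place-value weighted sum total += digit*power with power *= 10, instead of A's left-to-right Horner pass 10*result+digit with an embedded scan.
import Mathlib
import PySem

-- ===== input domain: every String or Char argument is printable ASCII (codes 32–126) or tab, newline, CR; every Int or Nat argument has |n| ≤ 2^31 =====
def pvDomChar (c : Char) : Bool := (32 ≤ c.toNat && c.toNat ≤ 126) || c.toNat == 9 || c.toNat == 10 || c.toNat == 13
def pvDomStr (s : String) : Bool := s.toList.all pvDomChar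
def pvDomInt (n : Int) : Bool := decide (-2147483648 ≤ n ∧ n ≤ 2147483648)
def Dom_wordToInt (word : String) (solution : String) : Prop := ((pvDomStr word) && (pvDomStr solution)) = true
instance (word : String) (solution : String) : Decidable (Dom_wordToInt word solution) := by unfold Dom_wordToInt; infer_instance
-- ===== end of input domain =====

-- B replaces A's left-to-right Horner pass with an embedded solution.find scan by a
-- first-occurrence char→digit index built once, then a right-to-left place-value sum
-- (total += digit*power, power *= 10) over the reversed word (objective: alternative).

-- ===== PORT A =====
-- A's loop: early return None on a missing char, else Horner-accumulate.
def wordToIntGo (cs : List Char) (sol : List Char) (result : Int) : Option Int :=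
  match cs with
  | [] => some result
  | c :: rest =>
    let digit := PySem.Chars.find sol [c]
    if digit < 0 then none
    else wordToIntGo rest sol (10 * result + digit)

def wordToInt (word : String) (solution : String) : Option Int :=
  wordToIntGo word.toList solution.toList 0

-- ===== PORT B =====
-- 'for i, c in enumerate(solution): if c not in index: index[c] = i'
def buildIndex (sol : List Char) : PySem.Dict Char Int :=
  (PySem.List.enumerate sol 0).foldl
    (fun d p => if d.contains p.2 then d else d.insert p.2 p.1) PySem.Dict.empty

-- 'for c in reversed(word): …  total += d*power; power *= 10'
def wordToIntAltGo (idx : PySem.Dict Char Int) (cs : List Char) (total power : Int) : Option Int :=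
  match cs with
  | [] => some total
  | c :: rest =>
    match idx.get? c with
    | none => none
    | some d => wordToIntAltGo idx rest (total + d * power) (power * 10)

def wordToInt_alt (word : String) (solution : String) : Option Int :=
  wordToIntAltGo (buildIndex solution.toList) word.toList.reverse 0 1

-- ===== PRECONDITION & SPEC =====
def Spec_wordToInt (word : String) (solution : String) (out : Option Int) : Prop := out = wordToInt_alt word solution
instance (word : String) (solution : String) (out : Option Int) : Decidable (Spec_wordToInt word solution out) := by unfold Spec_wordToInt; infer_instance

-- ===== CLAIM =====
def Claim_equal_wordToInt : Prop := ∀ (word : String) (solution : String), Dom_wordToInt word solution → Spec_wordToInt word solution (wordToInt word solution)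

-- ===== LEMMAS AND PROOFS =====

-- find.go with a nonempty needle either fails or returns at least the offset
theorem findGo_neg_or_ge (sub : List Char) (hsub : sub ≠ []) (s : List Char) (k : Nat) :
    PySem.Chars.find.go sub s k = -1 ∨ (k : Int) ≤ PySem.Chars.find.go sub s k := by
  induction s generalizing k with
  | nil => simp [PySem.Chars.find.go, List.isEmpty_iff, hsub]
  | cons a t ih =>
    simp only [PySem.Chars.find.go]
    by_cases h : sub.isPrefixOf (a :: t) = true
    · simp [h]
    · simp only [h]
      rcases ih (k + 1) with h1 | h1
      · exact Or.inl h1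
      · exact Or.inr (by omega)

-- shifting the offset of find.go
theorem findGo_shift (sub : List Char) (hsub : sub ≠ []) (s : List Char) (k : Nat) :
    PySem.Chars.find.go sub s k =
      if PySem.Chars.find.go sub s 0 = -1 then -1 else PySem.Chars.find.go sub s 0 + k := by
  induction s generalizing k with
  | nil => simp [PySem.Chars.find.go, List.isEmpty_iff, hsub]
  | cons a t ih =>
    simp only [PySem.Chars.find.go]
    by_cases h : sub.isPrefixOf (a :: t) = true
    · simp [h]
    · simp only [h]
      rw [ih (k + 1), ih 1]
      rcases findGo_neg_or_ge sub hsub t 0 with h1 | h1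
      · simp [h1]
      · split_ifs with h2 h3 h3 <;> push_cast <;> omega

-- unfolding Chars.find on a cons with a single-character needle
theorem find_single_cons (t : List Char) (a c : Char) :
    PySem.Chars.find (a :: t) [c] =
      if c == a then 0
      else if PySem.Chars.find t [c] = -1 then -1 else PySem.Chars.find t [c] + 1 := by
  simp only [PySem.Chars.find, PySem.Chars.find.go]
  have hpre : ([c].isPrefixOf (a :: t)) = (c == a) := by
    simp [List.isPrefixOf]
  rw [hpre, findGo_shift [c] (by simp) t 1]
  by_cases h : c == a <;> split_ifs <;> simp_all

theorem find_single_neg_iff (sol : List Char) (c : Char) :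
    PySem.Chars.find sol [c] < 0 ↔ PySem.Chars.find sol [c] = -1 := by
  rcases findGo_neg_or_ge [c] (by simp) sol 0 with h | h <;>
    simp only [PySem.Chars.find] <;> omega

-- the index dict built by B holds the first occurrence, i.e. Chars.find
theorem buildIndex_foldl_get (sol : List Char) (s : Nat) (d : PySem.Dict Char Int) (c : Char) :
    ((PySem.List.enumerate sol (s : Int)).foldl
      (fun d p => if d.contains p.2 then d else d.insert p.2 p.1) d).get? c =
      if d.contains c then d.get? c
      else if PySem.Chars.find sol [c] = -1 then none
      else some ((s : Int) + PySem.Chars.find sol [c]) := by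
  induction sol generalizing s d with
  | nil =>
    have hf : PySem.Chars.find ([] : List Char) [c] = -1 := by
      simp [PySem.Chars.find, PySem.Chars.find.go]
    simp only [PySem.List.enumerate_nil, List.foldl_nil, hf, if_true]
    by_cases h : d.contains c
    · simp [h]
    · have hnone : d.get? c = none := by
        cases hg : d.get? c with
        | none => rfl
        | some v =>
          have := PySem.Dict.contains_eq_isSome_get? (d := d) (k := c)
          rw [hg] at this
          simp [this] at h
      simp [h, hnone]
  | cons a t ih =>
    rw [PySem.List.enumerate_cons, List.foldl_cons]
    have hstep : ((s : Int) + 1) = ((s + 1 : Nat) : Int) := by push_cast; ring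
    have hor : PySem.Chars.find t [c] = -1 ∨ 0 ≤ PySem.Chars.find t [c] := by
      simpa [PySem.Chars.find] using findGo_neg_or_ge [c] (by simp) t 0
    by_cases hca : c = a
    · subst hca
      by_cases hd : d.contains c
      · simp only [hd, if_true, hstep]
        rw [ih]
        simp [hd]
      · simp only [hd, Bool.false_eq_true, if_false, hstep]
        rw [ih]
        simp [find_single_cons, PySem.Dict.get?_insert_self]
    · have hfind : PySem.Chars.find (a :: t) [c] =
          if PySem.Chars.find t [c] = -1 then -1 else PySem.Chars.find t [c] + 1 := by
        rw [find_single_cons]; simp [hca]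
      have hmain : ∀ d' : PySem.Dict Char Int, d'.contains c = d.contains c →
          d'.get? c = d.get? c →
          ((PySem.List.enumerate t ((s : Int) + 1)).foldl
            (fun d p => if d.contains p.2 then d else d.insert p.2 p.1) d').get? c =
          if d.contains c then d.get? c
          else if PySem.Chars.find (a :: t) [c] = -1 then none
          else some ((s : Int) + PySem.Chars.find (a :: t) [c]) := by
        intro d' hc1 hc2
        rw [hstep, ih, hc1, hc2]
        by_cases h1 : d.contains c
        · simp [h1]
        · by_cases h2 : PySem.Chars.find t [c] = -1
          · simp [h1, h2, hfind]
          · have h3 : PySem.Chars.find t [c] + 1 ≠ -1 := by omega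
            simp only [h1, Bool.false_eq_true, if_false, h2, hfind, h3, if_false]
            congr 1
            push_cast; ring
      by_cases hd : d.contains a
      · simp only [hd, if_true]
        exact hmain d rfl rfl
      · simp only [hd, Bool.false_eq_true, if_false]
        exact hmain (d.insert a (s : Int))
          (by simp [PySem.Dict.contains_insert, hca])
          (PySem.Dict.get?_insert_of_ne d (s : Int) hca)

theorem buildIndex_get (sol : List Char) (c : Char) :
    (buildIndex sol).get? c =
      if PySem.Chars.find sol [c] = -1 then none else some (PySem.Chars.find sol [c]) := by
  have h := buildIndex_foldl_get sol 0 PySem.Dict.empty c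
  simp only [Nat.cast_zero, zero_add] at h
  simpa [buildIndex, PySem.Dict.contains_empty] using h

-- the weighted value B computes, as a function of the (reversed) char list
def wval (sol : List Char) : List Char → Int
  | [] => 0
  | c :: rest => PySem.Chars.find sol [c] + 10 * wval sol rest

theorem wval_append (sol l : List Char) (c : Char) :
    wval sol (l ++ [c]) = wval sol l + PySem.Chars.find sol [c] * 10 ^ l.length := by
  induction l with
  | nil => simp [wval]
  | cons a t ih => simp [wval, ih]; ring

-- B's reversed loop computes total + power * wval
theorem altGo_spec (sol l : List Char) (t p : Int) :
    wordToIntAltGo (buildIndex sol) l t p =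
      if l.any (fun c => PySem.Chars.find sol [c] < 0) then none
      else some (t + p * wval sol l) := by
  induction l generalizing t p with
  | nil => simp [wordToIntAltGo, wval]
  | cons c rest ih =>
    simp only [wordToIntAltGo, buildIndex_get sol c, List.any_cons]
    by_cases h : PySem.Chars.find sol [c] = -1
    · have : PySem.Chars.find sol [c] < 0 := by omega
      simp [h]
    · have hlt : ¬ PySem.Chars.find sol [c] < 0 := fun hc =>
        h ((find_single_neg_iff sol c).mp hc)
    
      simp only [h, if_false, ih, hlt, decide_false, Bool.false_or]
      split_ifs with h2
      · rfl
      · simp [wval]; ring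

-- A's loop: early-None on any bad char, else a Horner fold
theorem wordToIntGo_eq (cs sol : List Char) (r : Int) :
    wordToIntGo cs sol r =
      if cs.any (fun c => PySem.Chars.find sol [c] < 0) then none
      else some (cs.foldl (fun r c => 10 * r + PySem.Chars.find sol [c]) r) := by
  induction cs generalizing r with
  | nil => simp [wordToIntGo]
  | cons c rest ih =>
    simp only [wordToIntGo, List.any_cons, List.foldl_cons]
    by_cases h : PySem.Chars.find sol [c] < 0
    · simp [h]
    · simp [h, ih]

-- Horner left-to-right equals the place-value sum of the reversed word
theorem horner_eq_wval (sol cs : List Char) (r : Int) :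
    cs.foldl (fun r c => 10 * r + PySem.Chars.find sol [c]) r =
      r * 10 ^ cs.length + wval sol cs.reverse := by
  induction cs generalizing r with
  | nil => simp [wval]
  | cons c rest ih =>
    simp only [List.foldl_cons, List.length_cons, List.reverse_cons, ih,
      wval_append, List.length_reverse]
    ring

-- ===== VERDICT =====
theorem wordToInt_spec : Claim_equal_wordToInt := by
  intro word solution _
  unfold Spec_wordToInt wordToInt wordToInt_alt
  rw [wordToIntGo_eq, altGo_spec]
  have hany : word.toList.reverse.any (fun c => PySem.Chars.find solution.toList [c] < 0)
      = word.toList.any (fun c => PySem.Chars.find solution.toList [c] < 0) := by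
    simp
  rw [hany]
  split_ifs with h
  · rfl
  · rw [horner_eq_wval]
    simp
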